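-- pv_equiv track=rewrite | github.com/AndrewDeSimone/Advent-Of-Code-2025 | Day6/solution.py | compute_column_widths
-- ===== SOURCE A (Python) =====
-- from typing import Tuple, List
--
-- def compute_column_widths(operations: str) -> List[int]:
--     widths = [1]
--     for char in operations[1:]:
--         if char in {'*', '+'}:
--             widths[-1] -= 1
--             widths.append(1)
--         else:
--             widths[-1] += 1
--
--     return widths
-- ===== SOURCE B (Python) =====
-- def compute_column_widths(operations: str):
--     # split-based: segments of operations[1:] between '*'/'+'; last column gets the +1
--     segs = operations[1:].replace('+', '*').split('*')
--     widths = [len(s) for s in segs]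
--     widths[-1] += 1
--     return widths
-- ===== Notes on version B (the rewrite author's own statement) =====
-- stated objective: simpler
-- what changed: Replaces the char-by-char loop that mutates the last width with a single split of operations[1:] on the operator characters, taking segment lengths and bumping only the last.
import Mathlib
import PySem

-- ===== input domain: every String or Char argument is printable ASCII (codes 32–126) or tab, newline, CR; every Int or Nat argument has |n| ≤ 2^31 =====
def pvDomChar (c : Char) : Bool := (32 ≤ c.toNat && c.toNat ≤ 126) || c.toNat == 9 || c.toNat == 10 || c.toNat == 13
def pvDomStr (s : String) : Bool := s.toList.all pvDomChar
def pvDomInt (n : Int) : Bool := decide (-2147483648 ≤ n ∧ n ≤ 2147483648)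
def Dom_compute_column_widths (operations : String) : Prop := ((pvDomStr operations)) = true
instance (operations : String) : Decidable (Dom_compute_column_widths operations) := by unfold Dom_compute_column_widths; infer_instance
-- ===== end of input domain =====

-- B replaces A's char-by-char loop (mutating the last width) by one split of operations[1:]
-- on the operator characters, mapping segments to their lengths and bumping only the last.

-- ===== PORT A =====
-- Python keeps `widths` as a list and mutates its last element; the port carries the
-- finished prefix `done` and the mutable last element `cur` (widths = done ++ [cur]).
def pvLoopA : List Char → List Int → Int → List Int
  | [], done, cur => done ++ [cur]
  | c :: cs, done, cur =>
    if c == '*' || c == '+' then pvLoopA cs (done ++ [cur - 1]) 1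
    else pvLoopA cs done (cur + 1)

def compute_column_widths (operations : String) : List Int :=
  pvLoopA (PySem.Str.slice operations (some 1) none).toList [] 1

-- ===== PORT B =====
-- widths[-1] += 1 on a non-empty list
def pvBumpLast : List Int → List Int
  | [] => []
  | [x] => [x + 1]
  | x :: xs => x :: pvBumpLast xs

def compute_column_widths_alt (operations : String) : List Int :=
  let segs := (PySem.Str.split?
      (PySem.Str.replace (PySem.Str.slice operations (some 1) none) "+" "*") "*").getD []
  pvBumpLast (segs.map PySem.Str.len)

-- ===== PRECONDITION & SPEC =====
def Spec_compute_column_widths (operations : String) (out : List Int) : Prop := out = compute_column_widths_alt operations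
instance (operations : String) (out : List Int) : Decidable (Spec_compute_column_widths operations out) := by unfold Spec_compute_column_widths; infer_instance

-- ===== CLAIM (what is proved, stated in full; the proofs are below) =====
def Claim_equal_compute_column_widths : Prop := ∀ (operations : String), Dom_compute_column_widths operations → Spec_compute_column_widths operations (compute_column_widths operations)

-- ===== LEMMAS AND PROOFS =====

-- splitting on the delimiter set {'*','+'}
def pvSplitD : List Char → List (List Char)
  | [] => [[]]
  | c :: cs =>
    if c == '*' || c == '+' then [] :: pvSplitD cs
    else match pvSplitD cs with
      | [] => [[c]]
      | s :: ss => (c :: s) :: ss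

def pvAddHead (d : Int) : List Int → List Int
  | [] => []
  | x :: xs => (x + d) :: xs

lemma pvSplitD_ne_nil (cs : List Char) : pvSplitD cs ≠ [] := by
  cases cs with
  | nil => simp [pvSplitD]
  | cons c cs =>
    simp only [pvSplitD]
    split
    · simp
    · split <;> simp

lemma pvBumpLast_cons (x : Int) (xs : List Int) (h : xs ≠ []) :
    pvBumpLast (x :: xs) = x :: pvBumpLast xs := by
  cases xs with
  | nil => simp at h
  | cons y ys => rfl

-- A's loop computes: done ++ (head gets cur-1 added) (bumped segment lengths)
lemma pvLoopA_eq (cs : List Char) : ∀ (done : List Int) (cur : Int),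
    pvLoopA cs done cur
      = done ++ pvAddHead (cur - 1) (pvBumpLast ((pvSplitD cs).map (fun s => (s.length : Int)))) := by
  induction cs with
  | nil => intro done cur; simp [pvLoopA, pvSplitD, pvBumpLast, pvAddHead]
  | cons c cs ih =>
    intro done cur
    simp only [pvLoopA, pvSplitD]
    by_cases hc : (c == '*' || c == '+') = true
    · simp only [hc, if_pos]
      rw [ih]
      have hne : ((pvSplitD cs).map (fun s => (s.length : Int))) ≠ [] := by
        simp [pvSplitD_ne_nil]
      have hbne : pvBumpLast ((pvSplitD cs).map (fun s => (s.length : Int))) ≠ [] := by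
        cases h : (pvSplitD cs).map (fun s => (s.length : Int)) with
        | nil => exact absurd h hne
        | cons y ys => cases ys <;> simp [pvBumpLast]
      simp only [List.map_cons]
      rw [pvBumpLast_cons _ _ hne]
      cases h : pvBumpLast ((pvSplitD cs).map (fun s => (s.length : Int))) with
      | nil => exact absurd h hbne
      | cons y ys =>
        simp [pvAddHead]
    · simp only [Bool.not_eq_true] at hc
      simp only [hc, Bool.false_eq_true, if_false]
      rw [ih]
      cases h : pvSplitD cs with
      | nil => exact absurd h (pvSplitD_ne_nil cs)
      | cons s ss =>
        cases ss with
        | nil => simp [pvBumpLast, pvAddHead]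
        | cons t ts =>
          simp only [List.map_cons]
          rw [pvBumpLast_cons _ _ (show ((t.length : Int) :: List.map (fun s => (s.length : Int)) ts) ≠ [] from by simp)]
          conv_rhs => rw [pvBumpLast_cons _ _ (show ((t.length : Int) :: List.map (fun s => (s.length : Int)) ts) ≠ [] from by simp)]
          simp [pvAddHead]

-- character translation performed by replace(s, "+", "*")
def pvRepl (c : Char) : Char := if c == '+' then '*' else c

def pvSplitStar : List Char → List (List Char)
  | [] => [[]]
  | c :: cs =>
    if c == '*' then [] :: pvSplitStar cs
    else match pvSplitStar cs with
      | [] => [[c]]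
      | s :: ss => (c :: s) :: ss

lemma pvSplitStar_ne_nil (cs : List Char) : pvSplitStar cs ≠ [] := by
  cases cs with
  | nil => simp [pvSplitStar]
  | cons c cs =>
    simp only [pvSplitStar]
    split
    · simp
    · split <;> simp

lemma pvReplace_go (l : List Char) : ∀ (fuel : Nat) (acc : List Char), l.length ≤ fuel →
    PySem.Chars.replace.go ['+'] ['*'] fuel l acc = acc.reverse ++ l.map pvRepl := by
  induction l with
  | nil => intro fuel acc _; cases fuel <;> simp [PySem.Chars.replace.go]
  | cons c t ih =>
    intro fuel acc hf
    cases fuel with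
    | zero => simp at hf
    | succ f =>
      simp only [PySem.Chars.replace.go, List.isPrefixOf]
      by_cases hc : ('+' == c) = true
      · simp only [hc, Bool.true_and, if_pos, List.length_cons, List.length_nil,
          List.drop_succ_cons, List.drop_zero]
        rw [ih f _ (by simpa using Nat.succ_le_succ_iff.mp hf)]
        have : c = '+' := (beq_iff_eq.mp hc).symm
        simp [this, pvRepl]
      · simp only [Bool.not_eq_true] at hc
        simp only [hc, Bool.false_and, Bool.false_eq_true, if_false]
        rw [ih f _ (by simpa using Nat.succ_le_succ_iff.mp hf)]
        have : ¬ c = '+' := fun h => by simp [h] at hc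
        simp [pvRepl, this]

lemma pvReplace_eq (l : List Char) :
    PySem.Chars.replace l ['+'] ['*'] = l.map pvRepl := by
  simp only [PySem.Chars.replace]
  rw [if_neg (by simp)]
  simpa using pvReplace_go l l.length [] (le_refl _)

def pvModHead (f : List Char → List Char) : List (List Char) → List (List Char)
  | [] => []
  | s :: ss => f s :: ss

lemma pvSplitOn_go (l : List Char) : ∀ (fuel : Nat) (cur : List Char) (acc : List (List Char)),
    l.length ≤ fuel →
    PySem.Chars.splitOn.go ['*'] fuel l cur acc
      = acc.reverse ++ pvModHead (cur.reverse ++ ·) (pvSplitStar l) := by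
  induction l with
  | nil => intro fuel cur acc _; cases fuel <;> simp [PySem.Chars.splitOn.go, pvSplitStar, pvModHead]
  | cons c t ih =>
    intro fuel cur acc hf
    cases fuel with
    | zero => simp at hf
    | succ f =>
      simp only [PySem.Chars.splitOn.go, List.isPrefixOf]
      by_cases hc : ('*' == c) = true
      · simp only [hc, Bool.true_and, if_pos, List.length_cons, List.length_nil,
          List.drop_succ_cons, List.drop_zero]
        rw [ih f _ _ (by simpa using Nat.succ_le_succ_iff.mp hf)]
        have hcc : c = '*' := (beq_iff_eq.mp hc).symm
        cases h : pvSplitStar t with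
        | nil => exact absurd h (pvSplitStar_ne_nil t)
        | cons s ss => simp [pvSplitStar, hcc, pvModHead, h]
      · simp only [Bool.not_eq_true] at hc
        simp only [hc, Bool.false_and, Bool.false_eq_true, if_false]
        rw [ih f _ _ (by simpa using Nat.succ_le_succ_iff.mp hf)]
        have hcc : ¬ c = '*' := fun h => by simp [h] at hc
        cases h : pvSplitStar t with
        | nil => exact absurd h (pvSplitStar_ne_nil t)
        | cons s ss => simp [pvSplitStar, hcc, pvModHead, h]

lemma pvSplitOn_eq (l : List Char) :
    PySem.Chars.splitOn l ['*'] = pvSplitStar l := by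
  simp only [PySem.Chars.splitOn]
  rw [pvSplitOn_go l (l.length + 1) [] [] (by omega)]
  cases h : pvSplitStar l with
  | nil => exact absurd h (pvSplitStar_ne_nil l)
  | cons s ss => simp [pvModHead]

lemma pvSplitStar_map (cs : List Char) :
    pvSplitStar (cs.map pvRepl) = (pvSplitD cs).map (List.map pvRepl) := by
  induction cs with
  | nil => simp [pvSplitStar, pvSplitD]
  | cons c cs ih =>
    simp only [List.map_cons, pvSplitStar, pvSplitD]
    by_cases hc : (c == '*' || c == '+') = true
    · have : pvRepl c = '*' := by
        rcases Bool.or_eq_true_iff.mp hc with h | h <;>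
          simp [pvRepl, beq_iff_eq.mp h]
      simp [this, hc, ih]
    · have h1 : ¬ c = '+' := fun h => by simp [h] at hc
      have h2 : ¬ c = '*' := fun h => by simp [h] at hc
      have hr : pvRepl c = c := by simp [pvRepl, h1]
      simp only [Bool.not_eq_true] at hc
      simp only [hr, hc, Bool.false_eq_true, if_false, if_neg (by simp [h2] : ¬ (c == '*') = true)]
      rw [ih]
      cases h : pvSplitD cs with
      | nil => exact absurd h (pvSplitD_ne_nil cs)
      | cons s ss => simp [hr]

lemma pvAddHead_zero (xs : List Int) : pvAddHead 0 xs = xs := by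
  cases xs <;> simp [pvAddHead]


-- ===== VERDICT (by name: the statement is the Claim_ definition above) =====
theorem compute_column_widths_spec : Claim_equal_compute_column_widths := by
  intro op _
  unfold Spec_compute_column_widths compute_column_widths compute_column_widths_alt
  have hmap := PySem.Str.split?_map
    (PySem.Str.replace (PySem.Str.slice op (some 1) none) "+" "*") "*"
  cases hs : PySem.Str.split? (PySem.Str.replace (PySem.Str.slice op (some 1) none) "+" "*") "*" with
  | none =>
    rw [hs] at hmap
    simp [PySem.Chars.split?] at hmap
  | some segs =>
    rw [hs] at hmap
    simp only [Option.map_some, PySem.Chars.split?,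
      if_neg (by simp : ¬ (String.toList "*").isEmpty = true)] at hmap
    have hmap' : List.map String.toList segs
        = List.map (List.map pvRepl) (pvSplitD (PySem.Str.slice op (some 1) none).toList) := by
      rw [Option.some.inj hmap, PySem.Str.toList_replace]
      show PySem.Chars.splitOn
        (PySem.Chars.replace (PySem.Str.slice op (some 1) none).toList ['+'] ['*']) ['*'] = _
      rw [pvReplace_eq, pvSplitOn_eq, pvSplitStar_map]
    have hlen : List.map PySem.Str.len segs
        = List.map (fun s => (s.length : Int)) (pvSplitD (PySem.Str.slice op (some 1) none).toList) := by
      have : List.map PySem.Str.len segs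
          = List.map (fun l => (l.length : Int)) (List.map String.toList segs) := by
        simp [List.map_map, PySem.Str.len_eq]
      rw [this, hmap', List.map_map]
      simp
    rw [pvLoopA_eq]
    simp only [Option.getD_some]
    rw [hlen]
    simp [pvAddHead_zero]
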